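-- pv_equiv track=rewrite | github.com/anumsaeed0/SequenceAlignmentTool | Multiple_Sequence_Alignement_Tool.py | parse_alignment
-- ===== SOURCE A (Python) =====
-- def parse_alignment(alignment_text):
--     alignment_list = alignment_text.split("\n")
--
--     alignment_list.pop(0)
--
--     align_dict = dict()
--
--     for alignment in alignment_list:
--         if alignment.strip() != "":
--             align_a = alignment.split()
--             if len(align_a)==3:
--                 seq_id = align_a[0]
--                 seq_align = align_a[1]
--                 if seq_id not in align_dict.keys():
--                     align_dict[seq_id] = seq_align
--                 else:
--                     align_dict[seq_id]+=seq_align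
--                 align_dict[seq_id].replace(" ", "")
--
--     return align_dict
-- ===== SOURCE B (Python) =====
-- def parse_alignment(alignment_text):
--     # Stage 1: flatten the body lines into an ordered list of (id, fragment) pairs.
--     pairs = [(p[0], p[1])
--              for line in alignment_text.split("\n")[1:]
--              for p in (line.split(),)
--              if line.strip() != "" and len(p) == 3]
--     # Stage 2: the sequence ids in first-seen order.
--     order = list(dict.fromkeys(s for s, _ in pairs))
--     # Stage 3: group by id — each sequence is the join of all its fragments.
--     return {sid: "".join(f for s, f in pairs if s == sid) for sid in order}
-- ===== Notes on version B (the rewrite author's own statement) =====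
-- stated objective: alternative
-- what changed: B replaces A's single pass that mutates a dict of growing strings by a three-stage pipeline: flatten the lines into an ordered (id, fragment) pair list, compute the distinct ids in first-seen order with dict.fromkeys, then build each sequence by filtering the pair list for that id and joining the fragments (a group-by-filter, no incremental per-key accumulation); A's no-op .replace is dropped.
import Mathlib
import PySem

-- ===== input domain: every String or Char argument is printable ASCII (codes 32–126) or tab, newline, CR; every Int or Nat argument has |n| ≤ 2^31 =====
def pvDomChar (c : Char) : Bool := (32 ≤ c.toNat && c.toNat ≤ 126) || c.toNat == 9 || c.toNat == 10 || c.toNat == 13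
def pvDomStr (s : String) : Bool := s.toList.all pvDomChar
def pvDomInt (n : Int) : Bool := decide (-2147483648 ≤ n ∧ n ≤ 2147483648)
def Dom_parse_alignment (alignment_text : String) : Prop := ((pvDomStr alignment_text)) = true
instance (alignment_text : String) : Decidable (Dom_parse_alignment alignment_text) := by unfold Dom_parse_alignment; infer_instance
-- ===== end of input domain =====

-- B replaces A's single-pass dict-of-growing-strings by a three-stage pipeline:
-- flatten lines to (id, fragment) pairs, dedup the ids in first-seen order, then
-- group-by-filter and join per id (objective: alternative; A's no-op .replace dropped).

-- ===== PORT A =====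
-- loop body of A's for-loop (align_dict is the running dict of concatenated strings)
def parseStepA (d : PySem.Dict String String) (alignment : String) : PySem.Dict String String :=
  if PySem.Str.strip alignment ≠ "" then
    let align_a := PySem.Str.split₀ alignment
    if align_a.length == 3 then
      let seq_id := (PySem.List.pyGet? align_a 0).getD ""
      let seq_align := (PySem.List.pyGet? align_a 1).getD ""
      if d.contains seq_id = false then
        d.insert seq_id seq_align
      else
        -- align_dict[seq_id] += seq_align  (string concatenation, via PySem.Str.join)
        d.insert seq_id (PySem.Str.join "" [d.getD seq_id "", seq_align])
      -- the trailing `align_dict[seq_id].replace(" ", "")` discards its result in Python: no effect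
    else d
  else d

def parse_alignment (alignment_text : String) : List (String × String) :=
  -- alignment_text.split("\n"); sep ≠ "" so split? is always `some`
  let alignment_list := (PySem.Str.split? alignment_text "\n").getD []
  -- alignment_list.pop(0); split("\n") is never empty so pop? is always `some`
  match PySem.List.pop? alignment_list 0 with
  | none => []
  | some (_, alignment_list) =>
    (alignment_list.foldl parseStepA PySem.Dict.empty).items

-- ===== PORT B =====
-- stage-1 comprehension body: the (id, fragment) pairs a single line contributes
def pvLinePairs (line : String) : List (String × String) :=
  let p := PySem.Str.split₀ line
  if PySem.Str.strip line ≠ "" ∧ p.length == 3 then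
    [((PySem.List.pyGet? p 0).getD "", (PySem.List.pyGet? p 1).getD "")]
  else []

def parse_alignment_alt (alignment_text : String) : List (String × String) :=
  let pairs := (PySem.List.slice ((PySem.Str.split? alignment_text "\n").getD [])
      (some 1) none).flatMap pvLinePairs
  let order := PySem.List.dedup (pairs.map Prod.fst)
  order.map (fun sid =>
    (sid, PySem.Str.join "" ((pairs.filter (fun q => q.1 == sid)).map Prod.snd)))

-- ===== PRECONDITION & SPEC =====
-- (no Pre_: A returns normally on every string)
def Spec_parse_alignment (alignment_text : String) (out : List (String × String)) : Prop := out = parse_alignment_alt alignment_text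
instance (alignment_text : String) (out : List (String × String)) : Decidable (Spec_parse_alignment alignment_text out) := by unfold Spec_parse_alignment; infer_instance

-- ===== CLAIM (what is proved, stated in full; the proofs are below) =====
def Claim_equal_parse_alignment : Prop := ∀ (alignment_text : String), Dom_parse_alignment alignment_text → Spec_parse_alignment alignment_text (parse_alignment alignment_text)

-- ===== LEMMAS AND PROOFS =====

-- A's loop body, re-expressed per contributed pair
def pvStepP (d : PySem.Dict String String) (q : String × String) : PySem.Dict String String :=
  if d.contains q.1 = false then d.insert q.1 q.2
  else d.insert q.1 (PySem.Str.join "" [d.getD q.1 "", q.2])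

-- the concatenation of the fragments a pair list holds for one id
def pvConcat (ps : List (String × String)) (sid : String) : String :=
  PySem.Str.join "" ((ps.filter (fun q => q.1 == sid)).map Prod.snd)

lemma pv_join_nil_flatten (M : List (List Char)) : PySem.Chars.join [] M = M.flatten := by
  induction M with
  | nil => simp [PySem.Chars.join_nil]
  | cons a M ih =>
    cases M with
    | nil => simp [PySem.Chars.join_singleton]
    | cons b M' =>
      rw [PySem.Chars.join_cons_cons]
      simp only [List.flatten_cons] at *
      simp [ih]

lemma pv_join_singleton (v : String) : PySem.Str.join "" [v] = v := by
  apply String.toList_injective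
  simp only [PySem.Str.toList_join, List.map_cons, List.map_nil]
  exact PySem.Chars.join_singleton _ _

lemma pv_join_append (L : List String) (v : String) :
    PySem.Str.join "" (L ++ [v]) = PySem.Str.join "" [PySem.Str.join "" L, v] := by
  apply String.toList_injective
  simp only [PySem.Str.toList_join, List.map_append, List.map_cons, List.map_nil]
  have he : ("" : String).toList = [] := rfl
  simp [he, pv_join_nil_flatten]

lemma pv_stepA_eq (d : PySem.Dict String String) (line : String) :
    parseStepA d line = (pvLinePairs line).foldl pvStepP d := by
  unfold parseStepA pvLinePairs pvStepP
  by_cases h1 : PySem.Str.strip line ≠ ""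
  · by_cases h2 : ((PySem.Str.split₀ line).length == 3) = true
    · simp [h1, h2]
    · simp [h1, h2]
  · simp [h1]

lemma pv_foldA_eq (lines : List String) (d : PySem.Dict String String) :
    lines.foldl parseStepA d = (lines.flatMap pvLinePairs).foldl pvStepP d := by
  induction lines generalizing d with
  | nil => rfl
  | cons x xs ih =>
    simp only [List.foldl_cons, List.flatMap_cons, List.foldl_append, pv_stepA_eq, ih]

lemma pv_concat_append_eq (ps : List (String × String)) (q : String × String) (sid : String)
    (h : sid = q.1) : pvConcat (ps ++ [q]) sid
      = PySem.Str.join "" [pvConcat ps sid, q.2] := by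
  unfold pvConcat
  rw [List.filter_append]
  simp only [List.filter_cons, List.filter_nil, h, beq_self_eq_true, if_pos, List.map_append,
    List.map_cons, List.map_nil]
  exact pv_join_append _ _

lemma pv_concat_append_ne (ps : List (String × String)) (q : String × String) (sid : String)
    (h : ¬ sid = q.1) : pvConcat (ps ++ [q]) sid = pvConcat ps sid := by
  unfold pvConcat
  rw [List.filter_append]
  have : (q.1 == sid) = false := by simpa using fun hq => h hq.symm
  simp [this]

lemma pv_concat_not_mem (ps : List (String × String)) (sid : String)
    (h : sid ∉ ps.map Prod.fst) : pvConcat ps sid = "" := by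
  unfold pvConcat
  have : ps.filter (fun q => q.1 == sid) = [] := by
    rw [List.filter_eq_nil_iff]
    intro q hq hbeq
    exact h (List.mem_map.mpr ⟨q, hq, eq_of_beq hbeq⟩)
  simp [this, PySem.Str.join]

-- invariant of A's fold: the dict holds, per first-seen-distinct id, the concatenation so far
lemma pv_fold_items (ps : List (String × String)) :
    (ps.foldl pvStepP PySem.Dict.empty).items
      = (PySem.Set.ofList (ps.map Prod.fst)).map (fun sid => (sid, pvConcat ps sid)) := by
  induction ps using List.reverseRecOn with
  | nil => rfl
  | append_singleton ps q ih =>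
    have hkeys : (ps.foldl pvStepP PySem.Dict.empty).keys
        = PySem.Set.ofList (ps.map Prod.fst) := by
      simp [PySem.Dict.keys, ih, List.map_map, Function.comp_def]
    have hnd : (ps.foldl pvStepP PySem.Dict.empty).keys.Nodup := by
      rw [hkeys]; exact PySem.Set.nodup_ofList _
    rw [List.foldl_append, List.foldl_cons, List.foldl_nil]
    rw [List.map_append, List.map_cons, List.map_nil, PySem.Set.ofList_append_singleton]
    by_cases hmem : q.1 ∈ PySem.Set.ofList (ps.map Prod.fst)
    · have hc : (ps.foldl pvStepP PySem.Dict.empty).contains q.1 = true := by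
        rw [PySem.Dict.contains_eq_decide_mem_keys, hkeys]; simpa using hmem
      rw [PySem.Set.add_of_mem hmem]
      rw [show pvStepP (ps.foldl pvStepP PySem.Dict.empty) q
            = (ps.foldl pvStepP PySem.Dict.empty).insert q.1
                (PySem.Str.join "" [(ps.foldl pvStepP PySem.Dict.empty).getD q.1 "", q.2]) from
          by simp [pvStepP, hc]]
      rw [PySem.Dict.items_insert_of_contains _ _ hc, ih, List.map_map]
      apply List.map_congr_left
      intro sid hsid
      simp only [Function.comp_apply]
      by_cases hq : (sid == q.1) = true
      · have hq' : sid = q.1 := eq_of_beq hq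
        have hgd : (ps.foldl pvStepP PySem.Dict.empty).getD q.1 "" = pvConcat ps q.1 := by
          apply PySem.Dict.getD_of_mem_items _ _ hnd
          rw [ih]
          exact List.mem_map.mpr ⟨q.1, hq' ▸ hsid, rfl⟩
        simp only [hq, if_pos, hgd]
        rw [pv_concat_append_eq ps q sid hq', hq']
      · have hq' : ¬ sid = q.1 := fun h => hq (by simp [h])
        simp only [hq, Bool.false_eq_true, if_false]
        rw [pv_concat_append_ne ps q sid hq']
    · have hc : (ps.foldl pvStepP PySem.Dict.empty).contains q.1 = false := by
        rw [PySem.Dict.contains_eq_decide_mem_keys, hkeys]; simpa using hmem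
      rw [PySem.Set.add_of_not_mem hmem]
      rw [show pvStepP (ps.foldl pvStepP PySem.Dict.empty) q
            = (ps.foldl pvStepP PySem.Dict.empty).insert q.1 q.2 from by simp [pvStepP, hc]]
      rw [PySem.Dict.items_insert_of_not_contains _ _ hc, ih, List.map_append, List.map_cons,
        List.map_nil]
      congr 1
      · apply List.map_congr_left
        intro sid hsid
        have hq' : ¬ sid = q.1 := fun h => hmem (h ▸ hsid)
        rw [pv_concat_append_ne ps q sid hq']
      · have hnm : q.1 ∉ ps.map Prod.fst := by simpa [pysem] using hmem
        rw [pv_concat_append_eq ps q q.1 rfl, pv_concat_not_mem ps q.1 hnm]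
        have hj : PySem.Str.join "" [("" : String), q.2] = q.2 := by
          have h1 := pv_join_append [] q.2
          simp only [List.nil_append] at h1
          have h2 : PySem.Str.join "" ([] : List String) = "" := rfl
          rw [h2] at h1
          rw [← h1, pv_join_singleton]
        rw [hj]

-- ===== VERDICT (by name: the statement is the Claim_ definition above) =====
theorem parse_alignment_spec : Claim_equal_parse_alignment := by
  intro t _
  unfold Spec_parse_alignment parse_alignment parse_alignment_alt
  dsimp only
  cases hl : (PySem.Str.split? t "\n").getD [] with
  | nil => simp [PySem.List.pop?, PySem.List.pyIdx?, PySem.List.slice]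
  | cons x xs =>
    simp only [PySem.List.pop?_zero_cons, PySem.List.slice_from_one, List.tail_cons]
    rw [pv_foldA_eq, pv_fold_items]
    simp only [PySem.List.dedup_eq_ofList]
    rfl
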